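-- pv_equiv track=rewrite | github.com/razahai/academic | courses/tjhsst/ai/1/jbf/jbf_q1.py | gen_csets
-- ===== SOURCE A (Python) =====
-- def gen_csets(n):
--     constraints = []
--
--     r = 0
--     for i in range(n):
--         constraint = set()
--         for j in range(n):
--             constraint.add(r)
--             r+=1
--         constraints.append(constraint)
--
--     c = 0
--     offset = 1
--     for i in range(n):
--         constraint = set()
--         for j in range(n):
--             constraint.add(c)
--             for k in range(n):
--                 c+=1
--         constraints.append(constraint)
--         c=offset
--         offset+=1
--
--     d1 = 0
--     diag1 = set()
--     for _ in range(n):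
--         diag1.add(d1)
--         d1+=n+1
--     constraints.append(diag1)
--
--     d2 = n-1
--     diag2 = set()
--     for _ in range(n):
--         diag2.add(d2)
--         d2+=n-1
--     constraints.append(diag2)
--
--     return constraints
-- ===== SOURCE B (Python) =====
-- def gen_csets(n):
--     rows = [set(range(i * n, i * n + n)) for i in range(n)]
--     cols = [set(range(i, i + n * n, n)) for i in range(n)]
--     diag1 = {j * (n + 1) for j in range(n)}
--     diag2 = {n - 1 + j * (n - 1) for j in range(n)}
--     return rows + cols + [diag1, diag2]
-- ===== Notes on version B (the rewrite author's own statement) =====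
-- stated objective: faster
-- what changed: Replaces the stateful nested loops (including the redundant O(n) inner k-loop used only to advance the column counter) with direct arithmetic-progression range() constructions for rows, columns and diagonals; intended as faster (O(n^2) vs O(n^3)); measured 19x at the largest size both finished.
import Mathlib
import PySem

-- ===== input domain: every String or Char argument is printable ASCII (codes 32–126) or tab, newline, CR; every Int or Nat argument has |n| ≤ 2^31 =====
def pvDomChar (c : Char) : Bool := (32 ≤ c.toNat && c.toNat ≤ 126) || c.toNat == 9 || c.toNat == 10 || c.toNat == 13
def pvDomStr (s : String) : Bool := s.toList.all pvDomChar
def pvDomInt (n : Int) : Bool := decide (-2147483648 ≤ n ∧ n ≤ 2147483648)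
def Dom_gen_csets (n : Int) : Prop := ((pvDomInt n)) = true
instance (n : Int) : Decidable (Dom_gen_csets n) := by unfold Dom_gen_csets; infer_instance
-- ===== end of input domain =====

-- B builds the constraint sets as arithmetic-progression ranges directly (dropping A's redundant
-- inner counter loop): intended as faster; a timing run measured 19x at the largest size both finished.

-- ===== PORT A =====
def gen_csets (n : Int) : List (List Int) :=
  let constraints : List (List Int) := []
  let r : Int := 0
  let st1 := (PySem.List.pyRange 0 n 1).foldl
    (fun (st : List (List Int) × Int) _ =>
      let p := (PySem.List.pyRange 0 n 1).foldl
        (fun (st2 : PySem.Set Int × Int) _ => (PySem.Set.add st2.1 st2.2, st2.2 + 1))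
        (PySem.Set.empty, st.2)
      (st.1 ++ [p.1], p.2))
    (constraints, r)
  let constraints := st1.1
  let c : Int := 0
  let offset : Int := 1
  let st2 := (PySem.List.pyRange 0 n 1).foldl
    (fun (st : List (List Int) × Int × Int) _ =>
      let p := (PySem.List.pyRange 0 n 1).foldl
        (fun (q : PySem.Set Int × Int) _ =>
          (PySem.Set.add q.1 q.2,
           (PySem.List.pyRange 0 n 1).foldl (fun cc _ => cc + 1) q.2))
        (PySem.Set.empty, st.2.1)
      (st.1 ++ [p.1], st.2.2, st.2.2 + 1))
    (constraints, c, offset)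
  let constraints := st2.1
  let d1 : Int := 0
  let p1 := (PySem.List.pyRange 0 n 1).foldl
    (fun (st : PySem.Set Int × Int) _ => (PySem.Set.add st.1 st.2, st.2 + (n + 1)))
    (PySem.Set.empty, d1)
  let constraints := constraints ++ [p1.1]
  let d2 : Int := n - 1
  let p2 := (PySem.List.pyRange 0 n 1).foldl
    (fun (st : PySem.Set Int × Int) _ => (PySem.Set.add st.1 st.2, st.2 + (n - 1)))
    (PySem.Set.empty, d2)
  constraints ++ [p2.1]

-- ===== PORT B =====
def gen_csets_alt (n : Int) : List (List Int) :=
  let rows := (PySem.List.pyRange 0 n 1).map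
    (fun i => PySem.Set.ofList (PySem.List.pyRange (i * n) (i * n + n) 1))
  let cols := (PySem.List.pyRange 0 n 1).map
    (fun i => PySem.Set.ofList (PySem.List.pyRange i (i + n * n) n))
  let diag1 := PySem.Set.ofList ((PySem.List.pyRange 0 n 1).map (fun j => j * (n + 1)))
  let diag2 := PySem.Set.ofList ((PySem.List.pyRange 0 n 1).map (fun j => n - 1 + j * (n - 1)))
  rows ++ cols ++ [diag1, diag2]

-- ===== PRECONDITION & SPEC =====
def Spec_gen_csets (n : Int) (out : List (List Int)) : Prop := out = gen_csets_alt n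
instance (n : Int) (out : List (List Int)) : Decidable (Spec_gen_csets n out) := by unfold Spec_gen_csets; infer_instance

-- ===== CLAIM (what is proved, stated in full; the proofs are below) =====
def Claim_equal_gen_csets : Prop := ∀ (n : Int), Dom_gen_csets n → Spec_gen_csets n (gen_csets n)

-- ===== LEMMAS AND PROOFS =====

theorem setLoop (m : Nat) (v step : Int) (h : 0 < step ∨ m ≤ 1) :
    (List.range m).foldl
      (fun (st : PySem.Set Int × Int) (_ : Nat) => (PySem.Set.add st.1 st.2, st.2 + step))
      (PySem.Set.empty, v)
    = ((List.range m).map (fun (j : Nat) => v + step * (j : Int)), v + step * m) := by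
  induction m with
  | zero => simp [PySem.Set.empty]
  | succ k ih =>
    have h' : 0 < step ∨ k ≤ 1 := by omega
    simp only [List.range_succ, List.foldl_append, ih h', List.foldl_cons, List.foldl_nil]
    refine Prod.ext ?_ ?_
    · rcases Nat.eq_zero_or_pos k with hk | hk
      · subst hk; simp [PySem.Set.add, PySem.Set.contains]
      · have hstep : 0 < step := by rcases h with h | h; exact h; omega
        show PySem.Set.add _ _ = _
        rw [PySem.Set.add]
        simp [PySem.Set.contains]
        exact fun x hx => ⟨by omega, by omega⟩
    · show v + step * (k : Int) + step = v + step * ((k : Nat) + 1 : Nat)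
      push_cast; ring

theorem rowsLoop (g : Nat) (m : Nat) :
    (List.range m).foldl
      (fun (st : List (List Int) × Int) (_ : Nat) =>
        let p := (List.range g).foldl
          (fun (st2 : PySem.Set Int × Int) (_ : Nat) => (PySem.Set.add st2.1 st2.2, st2.2 + 1))
          (PySem.Set.empty, st.2)
        (st.1 ++ [p.1], p.2))
      (([] : List (List Int)), (0 : Int))
    = ((List.range m).map (fun (i : Nat) => (List.range g).map (fun (j : Nat) => ((i : Int) * g + (j : Int)))),
       ((m : Int) * g)) := by
  induction m with
  | zero => simp
  | succ k ih =>
    simp only [List.range_succ, List.foldl_append, ih, List.foldl_cons, List.foldl_nil]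
    rw [setLoop g ((k : Int) * g) 1 (by omega)]
    refine Prod.ext ?_ ?_
    · show _ ++ _ = _
      rw [List.map_append]
      simp
    · show (k : Int) * g + 1 * g = ((k : Nat) + 1 : Nat) * (g : Int)
      push_cast; ring

theorem incLoop (g : Nat) (c : Int) :
    (List.range g).foldl (fun cc (_ : Nat) => cc + 1) c = c + g := by
  induction g with
  | zero => simp
  | succ m ih => rw [List.range_succ, List.foldl_append, ih]; simp; ring

theorem colsLoop (g : Nat) (hg : 0 < g) (cs0 : List (List Int)) (m : Nat) :
    (List.range m).foldl
      (fun (st : List (List Int) × Int × Int) (_ : Nat) =>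
        let p := (List.range g).foldl
          (fun (q : PySem.Set Int × Int) (_ : Nat) =>
            (PySem.Set.add q.1 q.2, (List.range g).foldl (fun cc (_ : Nat) => cc + 1) q.2))
          (PySem.Set.empty, st.2.1)
        (st.1 ++ [p.1], st.2.2, st.2.2 + 1))
      (cs0, (0 : Int), (1 : Int))
    = (cs0 ++ (List.range m).map (fun (i : Nat) => (List.range g).map (fun (j : Nat) => ((i : Int) + (g : Int) * (j : Int)))),
       (m : Int), (m : Int) + 1) := by
  simp only [incLoop]
  induction m with
  | zero => simp
  | succ k ih =>
    simp only [List.range_succ, List.foldl_append, ih, List.foldl_cons, List.foldl_nil]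
    rw [setLoop g (k : Int) (g : Int) (by omega)]
    refine Prod.ext ?_ ?_
    · show _ ++ _ = _
      rw [List.map_append]
      simp
    · refine Prod.ext ?_ ?_ <;> · show _ = _; push_cast; ring

theorem main_pos (g : Nat) (hg : 0 < g) :
    gen_csets (g : Int) = gen_csets_alt (g : Int) := by
  have hgz : ((g : Int)) ≠ 0 := by omega
  have hr : PySem.List.pyRange 0 (g : Int) 1 = (List.range g).map (fun (k : Nat) => (k : Int)) := by
    rw [PySem.List.pyRange_one]; simp
  have hrow : ∀ k : Nat, PySem.Set.ofList (PySem.List.pyRange ((k : Int) * g) ((k : Int) * g + g) 1)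
      = (List.range g).map (fun (j : Nat) => (k : Int) * g + (j : Int)) := by
    intro k
    rw [PySem.Set.ofList_eq_self_of_nodup _ (PySem.List.nodup_pyRange_one _ _),
      PySem.List.pyRange_one]
    simp
  have hdiv : ((g : Int) * g + g - 1) / g = g := by
    have h1 : (g : Int) * g + g - 1 = ((g : Int) - 1) + (g : Int) * g := by ring
    rw [h1, Int.add_mul_ediv_left _ _ hgz, Int.ediv_eq_zero_of_lt (by omega) (by omega)]
    ring
  have hcol : ∀ k : Nat, PySem.Set.ofList (PySem.List.pyRange (k : Int) ((k : Int) + g * g) (g : Int))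
      = (List.range g).map (fun (j : Nat) => (k : Int) + (g : Int) * (j : Int)) := by
    intro k
    rw [PySem.List.pyRange_of_pos _ _ (by omega : (0 : Int) < g)]
    have hcond : ((k : Int) < (k : Int) + g * g) := by nlinarith
    rw [if_pos hcond]
    have : ((k : Int) + g * g - k + g - 1) = (g : Int) * g + g - 1 := by ring
    rw [this, hdiv]
    have hnodup : ((List.range ((g : Int)).toNat).map (fun (j : Nat) => (k : Int) + (g : Int) * (j : Int))).Nodup := by
      refine List.Nodup.map ?_ (List.nodup_range)
      intro a b hab
      have : (g : Int) * a = (g : Int) * b := by linarith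
      have := mul_left_cancel₀ hgz this
      exact_mod_cast this
    rw [PySem.Set.ofList_eq_self_of_nodup _ (by simpa using hnodup)]
    simp
  have hd1 : PySem.Set.ofList ((List.range g).map (fun (k : Nat) => (k : Int) * ((g : Int) + 1)))
      = (List.range g).map (fun (j : Nat) => (0 : Int) + ((g : Int) + 1) * (j : Int)) := by
    rw [PySem.Set.ofList_eq_self_of_nodup _ ?_]
    · congr 1; funext j; ring
    · refine List.Nodup.map ?_ (List.nodup_range)
      intro a b hab
      have : ((a : Int)) = b := mul_right_cancel₀ (by omega) hab
      exact_mod_cast this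
  have hd2 : PySem.Set.ofList ((List.range g).map (fun (k : Nat) => (g : Int) - 1 + (k : Int) * ((g : Int) - 1)))
      = (List.range g).map (fun (j : Nat) => (g : Int) - 1 + ((g : Int) - 1) * (j : Int)) := by
    rw [PySem.Set.ofList_eq_self_of_nodup _ ?_]
    · congr 1; funext j; ring
    · rcases Nat.lt_or_ge g 2 with h2 | h2
      · have : g = 1 := by omega
        subst this; simp
      · refine List.Nodup.map ?_ (List.nodup_range)
        intro a b hab
        have hab2 : ((a : Int)) * ((g : Int) - 1) = b * ((g : Int) - 1) := by linarith
        have : ((a : Int)) = b := mul_right_cancel₀ (by omega) hab2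
        exact_mod_cast this
  unfold gen_csets gen_csets_alt
  simp only [hr, List.foldl_map, List.map_map, Function.comp_def]
  rw [rowsLoop g g]
  dsimp only
  rw [colsLoop g hg _ g]
  dsimp only
  rw [setLoop g 0 ((g : Int) + 1) (by omega),
    setLoop g ((g : Int) - 1) ((g : Int) - 1) (by omega)]
  dsimp only
  simp only [hrow, hcol, hd1, hd2]
  simp [List.append_assoc]

-- ===== VERDICT (by name: the statement is the Claim_ definition above) =====
theorem gen_csets_spec : Claim_equal_gen_csets := by
  intro n _
  show gen_csets n = gen_csets_alt n
  by_cases hn : n ≤ 0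
  · simp [gen_csets, gen_csets_alt, PySem.List.pyRange_one_eq_nil hn, PySem.Set.ofList_nil,
      PySem.Set.empty]
  · have : n = (n.toNat : Int) := by omega
    rw [this]
    exact main_pos n.toNat (by omega)
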